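-- pv_equiv track=rewrite | github.com/subinacls/sudoku-qr | backend/app/sudoku.py | get_subgrid_shape
-- ===== SOURCE A (Python) =====
-- import math
-- from typing import List, Tuple
--
-- def factor_pairs(n: int) -> Tuple[int, int]:
--     """Generate all factor pairs of n."""
--     for i in range(1, int(math.isqrt(n)) + 1):
--         if n % i == 0:
--             yield i, n // i
--
-- def get_subgrid_shape(size: int) -> Tuple[int, int]:
--     """Get subgrid shape (rows, cols) for given size."""
--     root = int(math.isqrt(size))
--     if root * root == size:
--         return root, root
--     # Choose closest factor pair
--     best = None
--     for r, c in factor_pairs(size):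
--         if r == 1:
--             continue
--         diff = abs(r - c)
--         if best is None or diff < abs(best[0] - best[1]):
--             best = (r, c)
--     # best should always be not None for size > 1
--     return best or (root, size // root)
-- ===== SOURCE B (Python) =====
-- import math
--
-- def get_subgrid_shape(size: int):
--     """Get subgrid shape (rows, cols) for given size."""
--     root = math.isqrt(size)
--     if root * root == size:
--         return root, root
--     for r in range(root, 1, -1):
--         if size % r == 0:
--             return r, size // r
--     return root, size // root
-- ===== Notes on version B (the rewrite author's own statement) =====
-- stated objective: simpler
-- what changed: Replaced the upward exhaustive scan over a factor-pair generator with a min-diff accumulator by a single downward loop from isqrt(size) that early-returns at the first divisor (which is automatically the closest pair).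
import Mathlib
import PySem

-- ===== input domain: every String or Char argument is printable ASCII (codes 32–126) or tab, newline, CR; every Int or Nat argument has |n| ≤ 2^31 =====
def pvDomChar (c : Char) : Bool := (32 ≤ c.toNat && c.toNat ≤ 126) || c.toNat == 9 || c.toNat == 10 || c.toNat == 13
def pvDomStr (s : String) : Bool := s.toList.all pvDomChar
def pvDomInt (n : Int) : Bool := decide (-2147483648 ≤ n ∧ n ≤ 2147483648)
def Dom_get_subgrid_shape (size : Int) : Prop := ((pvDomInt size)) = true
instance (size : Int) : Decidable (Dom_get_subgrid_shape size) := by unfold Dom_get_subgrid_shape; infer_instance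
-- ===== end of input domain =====

-- B replaces A's upward factor-pair scan with a min-diff accumulator by a downward
-- early-return loop from isqrt(size): same values, simpler single pass.

-- ===== PORT A =====
-- factor_pairs(n): the generator materialised as the list of pairs it yields, in order.
def factor_pairs (n : Int) : List (Int × Int) :=
  (PySem.List.pyRange 1 ((Nat.sqrt n.toNat : Int) + 1) 1).filterMap
    (fun i => if PySem.Int.mod n i = 0 then some (i, PySem.Int.floordiv n i) else none)

-- int(math.isqrt(size)) ported as Nat.sqrt size.toNat; exact for 0 ≤ size (Pre_; isqrt raises on negatives).
def get_subgrid_shape (size : Int) : Int × Int :=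
  let root : Int := (Nat.sqrt size.toNat : Int)
  if root * root = size then (root, root)
  else
    let best :=
      (factor_pairs size).foldl
        (fun best rc =>
          if rc.1 = 1 then best
          else
            match best with
            | none => some rc
            | some b => if |rc.1 - rc.2| < |b.1 - b.2| then some rc else best)
        none
    match best with
    | some b => b
    | none => (root, PySem.Int.floordiv size root)

-- ===== PORT B =====
def get_subgrid_shape_alt (size : Int) : Int × Int :=
  let root : Int := (Nat.sqrt size.toNat : Int)
  if root * root = size then (root, root)
  else
    match (PySem.List.pyRange root 1 (-1)).find? (fun r => PySem.Int.mod size r == 0) with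
    | some r => (r, PySem.Int.floordiv size r)
    | none => (root, PySem.Int.floordiv size root)

-- ===== PRECONDITION & SPEC =====
-- Pre_ excludes negative size, on which math.isqrt (in both A and B) raises ValueError.
def Pre_get_subgrid_shape (size : Int) : Prop := 0 ≤ size
instance (size : Int) : Decidable (Pre_get_subgrid_shape size) := by unfold Pre_get_subgrid_shape; infer_instance
def pvWitness_get_subgrid_shape : Int := 6

def Spec_get_subgrid_shape (size : Int) (out : Int × Int) : Prop := out = get_subgrid_shape_alt size
instance (size : Int) (out : Int × Int) : Decidable (Spec_get_subgrid_shape size out) := by unfold Spec_get_subgrid_shape; infer_instance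

-- ===== CLAIM (what is proved, stated in full; the proofs are below) =====
def Claim_equal_get_subgrid_shape : Prop := ∀ (size : Int), Dom_get_subgrid_shape size → Pre_get_subgrid_shape size → Spec_get_subgrid_shape size (get_subgrid_shape size)

-- ===== LEMMAS AND PROOFS =====

-- For divisors d < e both at most root (size not a perfect square), e's factor pair is strictly closer.
theorem closer_pair (size d e root : Int) (hrr : root * root ≤ size) (hns : root * root ≠ size)
    (hd2 : 2 ≤ d) (hde : d < e) (her : e ≤ root) (hdd : d ∣ size) (hed : e ∣ size) :
    |e - PySem.Int.floordiv size e| < |d - PySem.Int.floordiv size d| := by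
  have he0 : (0:Int) < e := by omega
  have hd0 : (0:Int) < d := by omega
  obtain ⟨a, ha⟩ := hed
  obtain ⟨b, hb⟩ := hdd
  have h1 : PySem.Int.floordiv size e = a := by
    rw [PySem.Int.floordiv_eq_ediv_of_pos he0, ha, Int.mul_ediv_cancel_left _ (by omega)]
  have h2 : PySem.Int.floordiv size d = b := by
    rw [PySem.Int.floordiv_eq_ediv_of_pos hd0, hb, Int.mul_ediv_cancel_left _ (by omega)]
  rw [h1, h2]
  have hee : e * e < size := by
    rcases lt_or_eq_of_le (show e * e ≤ size by nlinarith) with h | h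
    · exact h
    · exfalso; exact hns (by nlinarith)
  have hea : e < a := by nlinarith
  have hdb : d < b := by nlinarith
  have hab : a < b := by nlinarith
  rw [abs_of_nonpos (by omega), abs_of_nonpos (by omega)]
  omega

theorem loop_eq (size root : Int)
    (hrr : root * root ≤ size) (hns : root * root ≠ size) :
    ∀ (k : Nat), (1 + (k : Int)) ≤ root →
      ((PySem.List.pyRange 1 (1 + (k : Int) + 1) 1).filterMap
          (fun i => if PySem.Int.mod size i = 0 then some (i, PySem.Int.floordiv size i) else none)).foldl
        (fun best rc =>
          if rc.1 = 1 then best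
          else
            match best with
            | none => some rc
            | some b => if |rc.1 - rc.2| < |b.1 - b.2| then some rc else best)
        none
      = ((PySem.List.pyRange (1 + (k : Int)) 1 (-1)).find?
          (fun r => PySem.Int.mod size r == 0)).map
          (fun r => (r, PySem.Int.floordiv size r)) := by
  intro k
  induction k with
  | zero =>
    intro _
    have h12 : PySem.List.pyRange 1 (1 + ((0:Nat) : Int) + 1) 1 = [1] := by decide
    have h11 : PySem.List.pyRange (1 + ((0:Nat) : Int)) 1 (-1) = [] := by decide
    rw [h12, h11]
    simp [List.filterMap, PySem.Int.mod]
  | succ k ih =>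
    intro h
    have hm : (1:Int) + ((k+1 : Nat) : Int) = (1 + (k:Int)) + 1 := by push_cast; ring
    have hk1 : (1 + (k:Int)) ≤ root := by push_cast at h; omega
    have ih' := ih hk1
    set m : Int := 1 + (k:Int) with hmdef
    have hm1 : (1:Int) ≤ m := by omega
    rw [hm]
    have hsplit : PySem.List.pyRange 1 (m + 1 + 1) 1
        = PySem.List.pyRange 1 (m + 1) 1 ++ [m + 1] :=
      PySem.List.pyRange_one_succ_right (by omega)
    have hcons : PySem.List.pyRange (m + 1) 1 (-1)
        = (m + 1) :: PySem.List.pyRange m 1 (-1) := by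
      rw [PySem.List.pyRange_neg_one_cons (by omega : (1:Int) < m + 1)]
      norm_num
    rw [hsplit, hcons, List.filterMap_append, List.foldl_append]
    by_cases hdiv : PySem.Int.mod size (m + 1) = 0
    · have hfm1 : List.filterMap
          (fun i => if PySem.Int.mod size i = 0 then some (i, PySem.Int.floordiv size i) else none)
          [m + 1] = [(m + 1, PySem.Int.floordiv size (m + 1))] := by
        simp [List.filterMap, hdiv]
      rw [hfm1, ih']
      have hpred : (fun r => PySem.Int.mod size r == 0) (m + 1) = true := by
        simp [hdiv]
      rw [List.find?_cons_of_pos (p := fun r => PySem.Int.mod size r == 0) hpred]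
      cases hfd : (PySem.List.pyRange m 1 (-1)).find? (fun r => PySem.Int.mod size r == 0) with
      | none => simp [show (m + 1 : Int) ≠ 1 by omega]
      | some d =>
        have hdmem := List.mem_of_find?_eq_some hfd
        have hdp := List.find?_some hfd
        have hdr : 1 < d ∧ d ≤ m := (PySem.List.mem_pyRange_neg_one.mp hdmem)
        have hddvd : d ∣ size := by
          have : PySem.Int.mod size d = 0 := by simpa using hdp
          exact (PySem.Int.mod_eq_zero_iff_dvd size d).mp this
        have hedvd : (m + 1) ∣ size := (PySem.Int.mod_eq_zero_iff_dvd size (m+1)).mp hdiv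
        have hlt := closer_pair size d (m+1) root hrr hns (by omega) (by omega) (by omega) hddvd hedvd
        simp [show (m + 1 : Int) ≠ 1 by omega, hlt]
    · have hfm1 : List.filterMap
          (fun i => if PySem.Int.mod size i = 0 then some (i, PySem.Int.floordiv size i) else none)
          [m + 1] = [] := by
        simp [List.filterMap, hdiv]
      have hpred : (fun r => PySem.Int.mod size r == 0) (m + 1) = false := by
        simp [hdiv]
      rw [hfm1, List.find?_cons_of_neg (p := fun r => PySem.Int.mod size r == 0) (by simp [hdiv]), List.foldl_nil, ih']

theorem get_subgrid_shape_spec : Claim_equal_get_subgrid_shape := by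
  intro size _ hpre
  have hpre' : (0:Int) ≤ size := hpre
  unfold Spec_get_subgrid_shape get_subgrid_shape get_subgrid_shape_alt factor_pairs
  set root : Int := ((Nat.sqrt size.toNat : Nat) : Int) with hrdef
  clear_value root
  by_cases hsq : root * root = size
  · simp only [hsq, if_pos]
  · simp only [hsq, if_neg, not_false_iff]
    have hrr : root * root ≤ size := by
      have h1 : Nat.sqrt size.toNat * Nat.sqrt size.toNat ≤ size.toNat := by
        nlinarith [Nat.sqrt_le' size.toNat]
      rw [hrdef]
      calc ((Nat.sqrt size.toNat : Nat) : Int) * ((Nat.sqrt size.toNat : Nat) : Int)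
          = ((Nat.sqrt size.toNat * Nat.sqrt size.toNat : Nat) : Int) := by push_cast; ring
        _ ≤ ((size.toNat : Nat) : Int) := by exact_mod_cast h1
        _ = size := Int.toNat_of_nonneg hpre'
    have hroot1 : (1:Int) ≤ root := by
      rcases Nat.eq_zero_or_pos (Nat.sqrt size.toNat) with h0 | h0
      · exfalso
        have hz : size.toNat = 0 := Nat.sqrt_eq_zero.mp h0
        have hs0 : size = 0 := by omega
        exact hsq (by rw [hrdef, h0, hs0]; simp)
      · rw [hrdef]; exact_mod_cast h0
    have hk2 : (1:Int) + (((root - 1).toNat : Nat) : Int) = root := by omega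
    have hle := loop_eq size root hrr hsq (root - 1).toNat (le_of_eq hk2)
    rw [hk2] at hle
    rw [hle]
    cases (PySem.List.pyRange root 1 (-1)).find? (fun r => PySem.Int.mod size r == 0) <;> simp
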